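-- pv_equiv track=rewrite | github.com/LLian7/Sig_artifact | benchmark_treeawareVisp/treeaware_isp.py | _canonical_forest_lengths
-- ===== SOURCE A (Python) =====
-- def _canonical_forest_lengths(leaf_count: int) -> tuple[int, ...]:
--     if leaf_count < 0:
--         raise ValueError("leaf_count must be non-negative")
--     lengths = []
--     start = 0
--     remaining = leaf_count
--     while remaining > 0:
--         width = 1 << (remaining.bit_length() - 1)
--         while start % width != 0:
--             width >>= 1
--         lengths.append(width)
--         start += width
--         remaining -= width
--     return tuple(lengths)
-- ===== SOURCE B (Python) =====
-- def _canonical_forest_lengths(leaf_count: int) -> tuple[int, ...]: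
--     if leaf_count < 0:
--         raise ValueError("leaf_count must be non-negative")
--     lengths = []
--     n, p = leaf_count, 1
--     while n > 0:
--         if n % 2 == 1:
--             lengths.append(p)
--         n //= 2
--         p *= 2
--     return tuple(reversed(lengths))
-- ===== Notes on version B (the rewrite author's own statement) =====
-- stated objective: simpler
-- what changed: Replaces the greedy aligned-block loop (tracking start, remaining, an MSB width via bit_length and an inner alignment while-loop) by a single low-to-high scan using repeated halving and parity tests that collects each set bit's power of two and reverses the list; the start/alignment machinery disappears.
import Mathlib
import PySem

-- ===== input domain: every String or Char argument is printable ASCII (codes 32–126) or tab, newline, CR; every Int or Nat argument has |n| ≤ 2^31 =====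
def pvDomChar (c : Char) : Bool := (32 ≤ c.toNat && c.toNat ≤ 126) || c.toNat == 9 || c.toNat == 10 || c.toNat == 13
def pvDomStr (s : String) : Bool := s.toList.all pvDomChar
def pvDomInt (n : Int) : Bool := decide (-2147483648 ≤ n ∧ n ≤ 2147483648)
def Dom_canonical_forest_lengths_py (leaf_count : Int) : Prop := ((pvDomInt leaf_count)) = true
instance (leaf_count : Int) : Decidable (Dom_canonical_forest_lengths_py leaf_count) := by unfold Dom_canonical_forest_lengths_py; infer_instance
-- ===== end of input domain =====

-- B replaces A's greedy aligned-block loop by a low-to-high bit scan plus a reverse (simpler);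
-- both raise ValueError on negative input, which Pre_ excludes.

-- ===== PORT A =====
-- inner 'while start % width != 0: width >>= 1' (width >>= 1 = width // 2 for positive width)
def pyAlign (start width : Int) : Int :=
  if PySem.Int.mod start width = 0 then width
  else if _h : 1 < width then pyAlign start (PySem.Int.floordiv width 2)
  else width  -- unreachable for width ≥ 1 coming from A's loop; makes the recursion total
termination_by width.toNat
decreasing_by
  rw [PySem.Int.floordiv_eq_ediv_of_pos (by norm_num : (0:Int) < 2)]
  omega

-- positivity of the inner loop's result, needed for the outer loop's termination
theorem pyAlign_pos (start width : Int) (h : 0 < width) : 0 < pyAlign start width := by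
  fun_induction pyAlign start width with
  | case1 => omega
  | case2 w hnm hlt ih =>
      exact ih (by rw [PySem.Int.floordiv_eq_ediv_of_pos (by norm_num : (0:Int) < 2)]; omega)
  | case3 => omega

-- outer 'while remaining > 0' loop; 1 << (bit_length - 1) ported exactly as 2 ^ (bitLength - 1)
def pyLoop (start remaining : Int) : List Int :=
  if h : 0 < remaining then
    let width := pyAlign start ((2 : Int) ^ (PySem.Int.bitLength remaining - 1))
    width :: pyLoop (start + width) (remaining - width)
  else []
termination_by remaining.toNat
decreasing_by
  have hp : (0:Int) < (2 : Int) ^ (PySem.Int.bitLength remaining - 1) := by positivity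
  have h1 := pyAlign_pos start _ hp
  omega

def canonical_forest_lengths_py (leaf_count : Int) : List Int :=
  pyLoop 0 leaf_count

-- ===== PORT B =====
-- 'while n > 0: if n % 2 == 1: lengths.append(p); n //= 2; p *= 2' then reversed(lengths)
def altLoop (n p : Int) (acc : List Int) : List Int :=
  if h : 0 < n then
    altLoop (PySem.Int.floordiv n 2) (p * 2)
      (if PySem.Int.mod n 2 = 1 then acc ++ [p] else acc)
  else acc
termination_by n.toNat
decreasing_by
  rw [PySem.Int.floordiv_eq_ediv_of_pos (by norm_num : (0:Int) < 2)]
  omega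

def canonical_forest_lengths_py_alt (leaf_count : Int) : List Int :=
  (altLoop leaf_count 1 []).reverse

-- ===== PRECONDITION & SPEC =====
-- A raises ValueError on negative leaf_count; Pre_ excludes exactly those inputs.
def Pre_canonical_forest_lengths_py (leaf_count : Int) : Prop := 0 ≤ leaf_count
instance (leaf_count : Int) : Decidable (Pre_canonical_forest_lengths_py leaf_count) := by
  unfold Pre_canonical_forest_lengths_py; infer_instance

def pvWitness_canonical_forest_lengths_py : Int := (13)

def Spec_canonical_forest_lengths_py (leaf_count : Int) (out : List Int) : Prop := out = canonical_forest_lengths_py_alt leaf_count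
instance (leaf_count : Int) (out : List Int) : Decidable (Spec_canonical_forest_lengths_py leaf_count out) := by unfold Spec_canonical_forest_lengths_py; infer_instance

-- ===== CLAIM (what is proved, stated in full; the proofs are below) =====
def Claim_equal_canonical_forest_lengths_py : Prop := ∀ (leaf_count : Int), Dom_canonical_forest_lengths_py leaf_count → Pre_canonical_forest_lengths_py leaf_count → Spec_canonical_forest_lengths_py leaf_count (canonical_forest_lengths_py leaf_count)

-- ===== LEMMAS AND PROOFS =====

-- ghost description of the common result: the set bits of r below position k, MSB first
def gBits : Nat → Int → List Int
  | 0, _ => []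
  | (k+1), r => if (2:Int) ^ k ≤ r then (2:Int) ^ k :: gBits k (r - 2 ^ k) else gBits k r

theorem gBits_succ (k : Nat) (r : Int) :
    gBits (k+1) r = if (2:Int) ^ k ≤ r then (2:Int) ^ k :: gBits k (r - 2 ^ k) else gBits k r := rfl

theorem pyAlign_dvd (start width : Int) (hd : width ∣ start) :
    pyAlign start width = width := by
  unfold pyAlign
  rw [if_pos ((PySem.Int.mod_eq_zero_iff_dvd start width).mpr hd)]

theorem bitLength_eq (r : Int) (k : Nat) (h1 : (2:Int) ^ k ≤ r) (h2 : r < 2 ^ (k+1)) :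
    PySem.Int.bitLength r = k + 1 := by
  have hr : 0 < r := lt_of_lt_of_le (by positivity) h1
  have hub := PySem.Int.lt_two_pow_bitLength r
  have hlb := PySem.Int.two_pow_bitLength_le r (by omega)
  have e1 : (((2:Nat) ^ k : Nat) : Int) = (2:Int) ^ k := by push_cast; ring
  have e2 : (((2:Nat) ^ (k+1) : Nat) : Int) = (2:Int) ^ (k+1) := by push_cast; ring
  have h1' : (2:Nat) ^ k ≤ r.natAbs := by omega
  have h2' : r.natAbs < (2:Nat) ^ (k+1) := by omega
  have hk : k < PySem.Int.bitLength r := by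
    have : (2:Nat) ^ k < 2 ^ (PySem.Int.bitLength r) := lt_of_le_of_lt h1' hub
    exact (Nat.pow_lt_pow_iff_right (by norm_num)).mp this
  have hk2 : PySem.Int.bitLength r - 1 < k + 1 := by
    have : (2:Nat) ^ (PySem.Int.bitLength r - 1) < 2 ^ (k+1) := lt_of_le_of_lt hlb h2'
    exact (Nat.pow_lt_pow_iff_right (by norm_num)).mp this
  omega

theorem pyLoop_eq_gBits (k : Nat) : ∀ (start r : Int), 0 ≤ r → r < 2 ^ k →
    (2:Int) ^ k ∣ start → pyLoop start r = gBits k r := by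
  induction k with
  | zero =>
      intro start r h0 h1 _
      have h1' : r < 1 := by simpa using h1
      rw [pyLoop, dif_neg (by omega)]
      simp [gBits]
  | succ k ih =>
      intro start r h0 h1 hdvd
      have hpow : (2:Int) ^ (k+1) = 2 ^ k + 2 ^ k := by ring
      by_cases hbit : (2:Int) ^ k ≤ r
      · -- top bit set: A takes width = 2^k
        have hrpos : 0 < r := lt_of_lt_of_le (by positivity) hbit
        have hbl : PySem.Int.bitLength r = k + 1 := bitLength_eq r k hbit h1
        have hdk : (2:Int) ^ k ∣ start := dvd_trans (pow_dvd_pow 2 (by omega)) hdvd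
        have hw : pyAlign start ((2:Int) ^ (PySem.Int.bitLength r - 1)) = 2 ^ k := by
          rw [hbl]
          simpa using pyAlign_dvd start ((2:Int) ^ k) hdk
        rw [pyLoop, dif_pos hrpos]
        simp only [hw]
        rw [gBits_succ, if_pos hbit]
        congr 1
        exact ih (start + 2 ^ k) (r - 2 ^ k) (by omega) (by omega)
          (dvd_add hdk (dvd_refl _))
      · rw [gBits_succ, if_neg hbit]
        exact ih start r h0 (by omega) (dvd_trans (pow_dvd_pow 2 (by omega)) hdvd)

-- halving characterisation of gBits
theorem gBits_succ_eq (k : Nat) : ∀ r : Int, 0 ≤ r → r < 2 ^ (k+1) →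
    gBits (k+1) r = (gBits k (r / 2)).map (· * 2) ++ (if r % 2 = 1 then [1] else []) := by
  induction k with
  | zero =>
      intro r h0 h1
      have h1' : r < 2 := by simpa using h1
      interval_cases r <;> norm_num [gBits]
  | succ k ih =>
      intro r h0 h1
      have hpow1 : (2:Int) ^ (k+1) = 2 ^ k * 2 := by ring
      have hpow2 : (2:Int) ^ (k+2) = 2 ^ (k+1) * 2 := by ring
      by_cases hbit : (2:Int) ^ (k+1) ≤ r
      · have hhi : (2:Int) ^ k ≤ r / 2 := by omega
        have e1 : gBits (k+2) r = 2 ^ (k+1) :: gBits (k+1) (r - 2 ^ (k+1)) := by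
          rw [gBits_succ, if_pos hbit]
        have e2 : gBits (k+1) (r / 2) = 2 ^ k :: gBits k (r / 2 - 2 ^ k) := by
          rw [gBits_succ, if_pos hhi]
        have hr2 : (r - 2 ^ (k+1)) / 2 = r / 2 - 2 ^ k := by omega
        have hm : (r - 2 ^ (k+1)) % 2 = r % 2 := by omega
        have hrec := ih (r - 2 ^ (k+1)) (by omega) (by omega)
        rw [hr2, hm] at hrec
        rw [e1, e2, hrec, List.map_cons, hpow1]
        rfl
      · have e1 : gBits (k+2) r = gBits (k+1) r := by rw [gBits_succ, if_neg hbit]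
        have hh : r / 2 < 2 ^ k := by omega
        have e2 : gBits (k+1) (r / 2) = gBits k (r / 2) := by
          rw [gBits_succ, if_neg (by omega)]
        rw [e1, ih r h0 (by omega), e2]

theorem altLoop_eq_gBits (k : Nat) : ∀ (r p : Int) (acc : List Int), 0 ≤ r → r < 2 ^ k →
    altLoop r p acc = acc ++ ((gBits k r).map (· * p)).reverse := by
  induction k with
  | zero =>
      intro r p acc h0 h1
      have h1' : r < 1 := by simpa using h1
      rw [altLoop, dif_neg (by omega)]
      simp [gBits]
  | succ k ih =>
      intro r p acc h0 h1
      have hpow : (2:Int) ^ (k+1) = 2 ^ k * 2 := by ring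
      by_cases hr : 0 < r
      · rw [altLoop, dif_pos hr]
        have hfd : PySem.Int.floordiv r 2 = r / 2 :=
          PySem.Int.floordiv_eq_ediv_of_pos (by norm_num)
        have hmd : PySem.Int.mod r 2 = r % 2 :=
          PySem.Int.mod_eq_emod_of_pos (by norm_num)
        have hhalf : r / 2 < 2 ^ k := by omega
        rw [hfd, hmd, ih (r/2) (p*2) _ (by omega) hhalf]
        rw [gBits_succ_eq k r h0 h1]
        have hmap : ((gBits k (r/2)).map (· * 2) ++ (if r % 2 = 1 then [1] else [])).map (· * p)
            = (gBits k (r/2)).map (· * (p * 2))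
              ++ (if r % 2 = 1 then [p] else []) := by
          rw [List.map_append, List.map_map]
          congr 1
          · apply List.map_congr_left
            intro x _
            simp only [Function.comp_apply]
            ring
          · split <;> simp
        rw [hmap, List.reverse_append]
        by_cases hodd : r % 2 = 1 <;> simp [hodd]
      · have hz : r = 0 := by omega
        subst hz
        rw [altLoop, dif_neg (by omega)]
        have e1 : gBits (k+1) (0:Int) = gBits k 0 := by
          have : (0:Int) < 2 ^ k := by positivity
          rw [gBits_succ, if_neg (by omega)]
        rw [e1]
        have := ih 0 p acc (by omega) (by positivity)
        rw [altLoop, dif_neg (by omega)] at this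
        rw [← this]

-- ===== VERDICT (by name: the statement is the Claim_ definition above) =====
theorem canonical_forest_lengths_py_spec : Claim_equal_canonical_forest_lengths_py := by
  intro n hdom hpre
  unfold Spec_canonical_forest_lengths_py canonical_forest_lengths_py canonical_forest_lengths_py_alt
  have hn : 0 ≤ n := hpre
  have hub : n < 2 ^ 32 := by
    unfold Dom_canonical_forest_lengths_py pvDomInt at hdom
    simp only [decide_eq_true_eq] at hdom
    have : (2:Int) ^ 32 = 4294967296 := by norm_num
    omega
  rw [pyLoop_eq_gBits 32 0 n hn hub (dvd_zero _)]
  rw [altLoop_eq_gBits 32 n 1 [] hn hub]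
  simp
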